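-- pv_equiv track=rewrite | github.com/rgvsiva/Tasks_MajorCompanies | encoding_strings.py | count_logic
-- ===== SOURCE A (Python) =====
-- def count_logic(st):
--     count=1
--     if len(st)==st.count(st[0]):
--         return str(st.count(st[0]))+st[0]
--     elif len(st)>1:
--         for i in range(len(st)-1):
--             if st[i]==st[i+1]:
--                 count+=1
--             else:
--                 return str(count)+st[i]
--     else:
--         return str(count)+st[0]
-- ===== SOURCE B (Python) =====
-- def count_logic(st):
--     c = st[0]
--     return str(len(st) - len(st.lstrip(c))) + c
-- ===== Notes on version B (the rewrite author's own statement) =====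
-- stated objective: idiomatic
-- what changed: Replaces A's all-same special case plus the manual adjacent-pair index loop with no explicit loop at all: B strips the leading run with the library call st.lstrip(st[0]) and reads the run length off as a length difference.
import Mathlib
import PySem

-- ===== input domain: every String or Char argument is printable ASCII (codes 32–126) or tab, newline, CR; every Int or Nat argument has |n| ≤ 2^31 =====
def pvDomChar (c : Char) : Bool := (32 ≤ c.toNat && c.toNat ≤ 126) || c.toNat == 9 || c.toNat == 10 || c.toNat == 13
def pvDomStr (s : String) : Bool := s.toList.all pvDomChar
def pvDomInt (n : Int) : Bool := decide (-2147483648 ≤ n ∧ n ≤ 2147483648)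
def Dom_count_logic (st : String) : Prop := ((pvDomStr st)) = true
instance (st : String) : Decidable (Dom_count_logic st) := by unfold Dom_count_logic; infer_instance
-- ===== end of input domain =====

-- B removes A's all-same special case and manual adjacent-pair loop entirely: it strips the
-- leading run with st.lstrip(st[0]) and returns the length difference; objective: idiomatic.
-- Pre_ excludes only "" (A raises IndexError on st[0]).


-- ===== PORT A =====
-- 'for i in range(len(st)-1): if st[i]==st[i+1]: count+=1 else: return str(count)+st[i]'
-- ported as structural recursion over the adjacent pairs; none = the loop fell through
-- (Python would return None there; unreachable for nonempty st).
def aLoop (count : Int) : List Char → Option String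
  | a :: b :: rest =>
      if a == b then aLoop (count + 1) (b :: rest)
      else some (PySem.Int.toStr count ++ String.mk [a])
  | _ => none

-- st.count(st[0]) with a single-character needle counts occurrences of that character,
-- ported as List.count (exact for a one-char substring).
def count_logic (st : String) : String :=
  match st.toList with
  | [] => ""          -- st[0] raises IndexError: outside Pre_
  | c0 :: rest =>
      if (c0 :: rest).length = (c0 :: rest).count c0 then
        PySem.Int.toStr ((c0 :: rest).count c0 : Int) ++ String.mk [c0]
      else if 1 < (c0 :: rest).length then
        (aLoop 1 (c0 :: rest)).getD ""          -- fall-through (None) is unreachable here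
      else
        PySem.Int.toStr 1 ++ String.mk [c0]

-- ===== PORT B =====
-- st.lstrip(c) with a single-character strip set removes exactly the leading run of c:
-- ported by hand as List.dropWhile (· == c), which is exact for a one-character strip set.
def count_logic_alt (st : String) : String :=
  match st.toList with
  | [] => ""          -- st[0] raises IndexError: outside Pre_
  | c :: _ =>
      PySem.Int.toStr ((st.toList.length - (st.toList.dropWhile (fun x => x == c)).length : Nat) : Int)
        ++ String.mk [c]

-- ===== PRECONDITION & SPEC =====
-- A raises IndexError on the empty string (st[0]); that is all Pre_ excludes.
def Pre_count_logic (st : String) : Prop := st ≠ ""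
instance (st : String) : Decidable (Pre_count_logic st) := by unfold Pre_count_logic; infer_instance
def pvWitness_count_logic : String := "aab"
def Spec_count_logic (st : String) (out : String) : Prop := out = count_logic_alt st
instance (st : String) (out : String) : Decidable (Spec_count_logic st out) := by unfold Spec_count_logic; infer_instance

-- ===== CLAIM (what is proved, stated in full; the proofs are below) =====
def Claim_equal_count_logic : Prop := ∀ (st : String), Dom_count_logic st → Pre_count_logic st → Spec_count_logic st (count_logic st)

-- ===== LEMMAS AND PROOFS =====
-- proof-side abbreviation for B's length difference (the leading-run length)
def runLen (c : Char) (l : List Char) : Nat := l.length - (l.dropWhile (fun x => x == c)).length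

theorem runLen_cons (c b : Char) (rest : List Char) :
    runLen c (b :: rest) = if b = c then runLen c rest + 1 else 0 := by
  by_cases hb : b = c
  · have hle : (rest.dropWhile (fun x => x == c)).length ≤ rest.length :=
      List.length_dropWhile_le _ _
    simp [runLen, hb]
    omega
  · simp [runLen, hb]

theorem aLoop_run (c : Char) (l : List Char) (n : Int) (h : ∃ x ∈ l, x ≠ c) :
    aLoop n (c :: l) = some (PySem.Int.toStr (n + (runLen c l : Int)) ++ String.mk [c]) := by
  induction l generalizing n with
  | nil => simp at h
  | cons b rest ih =>
      by_cases hb : b = c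
      · subst hb
        have h' : ∃ x ∈ rest, x ≠ b := by
          rcases h with ⟨x, hx, hxne⟩
          rcases List.mem_cons.mp hx with h1 | h1
          · exact absurd h1 hxne
          · exact ⟨x, h1, hxne⟩
        rw [show aLoop n (b :: b :: rest) = aLoop (n + 1) (b :: rest) by simp [aLoop]]
        rw [ih (n + 1) h']
        have : n + 1 + (runLen b rest : Int) = n + (runLen b (b :: rest) : Int) := by
          rw [runLen_cons, if_pos rfl]; push_cast; ring
        rw [this]
      · have hcb : (c == b) = false := by
          simp only [beq_eq_false_iff_ne]
          exact fun hcb => hb hcb.symm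
        have : aLoop n (c :: b :: rest) = some (PySem.Int.toStr n ++ String.mk [c]) := by
          simp [aLoop, hcb]
        rw [this]
        have hbr : runLen c (b :: rest) = 0 := by rw [runLen_cons, if_neg hb]
        simp [hbr]

-- ===== VERDICT (by name: the statement is the Claim_ definition above) =====
theorem count_logic_spec : Claim_equal_count_logic := by
  intro st _ hpre
  unfold Spec_count_logic count_logic count_logic_alt
  cases hl : st.toList with
  | nil => exact absurd (String.toList_eq_nil_iff.mp hl) hpre
  | cons c0 rest =>
      by_cases hall : ∀ x ∈ rest, x = c0
      · -- all characters equal st[0]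
        have hcnt : (c0 :: rest).count c0 = (c0 :: rest).length := by
          rw [List.count_eq_length]
          intro b hb
          rcases List.mem_cons.mp hb with h1 | h1
          · exact h1.symm
          · exact (hall b h1).symm
        have hd : List.dropWhile (fun x => x == c0) rest = [] := by
          rw [List.dropWhile_eq_nil_iff]
          intro x hx
          simp [hall x hx]
        simp [hcnt, hd]
      · -- a mismatch exists
        push_neg at hall
        rcases hall with ⟨y, hy, hyne⟩
        have hcnt : ¬ (c0 :: rest).length = (c0 :: rest).count c0 := by
          intro he
          exact hyne ((List.count_eq_length.mp he.symm y (by simp [hy])).symm)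
        have hlen : 1 < (c0 :: rest).length := by
          cases rest with
          | nil => simp at hy
          | cons _ _ => simp
        have harg : (1 : Int) + (runLen c0 rest : Int) = (runLen c0 (c0 :: rest) : Int) := by
          rw [runLen_cons, if_pos rfl]; push_cast; ring
        simp only [if_neg hcnt, if_pos hlen, aLoop_run c0 rest 1 ⟨y, hy, hyne⟩,
          Option.getD_some, harg]
        rfl
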